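-- pv_equiv track=rewrite | github.com/vvoelz/biceps | docs/examples/full_examples/albocycline/biceps/toolbox.py | list_res
-- ===== SOURCE A (Python) =====
-- def list_res(input_data):
--     """Determine what scheme is included in sampling"""
--
-- #    input_data = sort_data(data)
--     scheme=[]
--     for i in input_data[0]:
--         if i.endswith('.cs_H'):
--             scheme.append('cs_H')
--         elif i.endswith('.cs_Ha'):
--             scheme.append('cs_Ha')
--         elif i.endswith('.cs_N'):
--             scheme.append('cs_N')
--         elif i.endswith('.cs_Ca'):
--             scheme.append('cs_Ca')
--         elif i.endswith('.J'):
--             scheme.append('J')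
--         elif i.endswith('.pf'):
--             scheme.append('pf')
--         elif i.endswith('.noe'):
--             scheme.append('noe')
-- #                scheme.append('gamma')
--         else:
--             raise ValueError("Incompatible File extension. Use:{*.noe, *.J, *.cs_H, *.cs_Ha, *.cs_N, *.cs_Ca, *.pf}")
--
--     return scheme
-- ===== SOURCE B (Python) =====
-- _TAGS = {'cs_H', 'cs_Ha', 'cs_N', 'cs_Ca', 'J', 'pf', 'noe'}
--
-- def _tag(filename):
--     # Extract the extension after the last dot once; since no tag contains a
--     # dot, filename.endswith('.'+tag) holds iff that extension equals tag.
--     _, dot, ext = filename.rpartition('.')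
--     if dot and ext in _TAGS:
--         return ext
--     raise ValueError("Incompatible File extension. Use:{*.noe, *.J, *.cs_H, *.cs_Ha, *.cs_N, *.cs_Ca, *.pf}")
--
-- def list_res(input_data):
--     """Determine what scheme is included in sampling"""
--     return [_tag(i) for i in input_data[0]]
-- ===== Notes on version B (the rewrite author's own statement) =====
-- stated objective: alternative
-- what changed: Instead of testing up to seven suffixes per filename with endswith, B extracts the extension after the last dot once with str.rpartition('.') and does a single membership test in a set of the seven tags, returning the extension itself; this is equivalent because no tag contains a dot, so filename.endswith('.'+tag) holds exactly when the rpartition extension equals tag, and the suffixes are mutually exclusive.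
import Mathlib
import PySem

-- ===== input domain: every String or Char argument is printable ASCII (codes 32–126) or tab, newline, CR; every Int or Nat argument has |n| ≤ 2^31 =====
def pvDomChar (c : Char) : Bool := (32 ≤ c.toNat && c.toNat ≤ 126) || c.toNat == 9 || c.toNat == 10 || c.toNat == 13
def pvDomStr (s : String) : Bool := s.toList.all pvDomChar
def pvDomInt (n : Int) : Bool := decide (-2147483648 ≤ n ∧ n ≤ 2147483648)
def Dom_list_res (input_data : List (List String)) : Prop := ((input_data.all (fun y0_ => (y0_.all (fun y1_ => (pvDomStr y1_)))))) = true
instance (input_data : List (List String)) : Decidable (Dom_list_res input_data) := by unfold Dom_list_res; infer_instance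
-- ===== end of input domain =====

-- B replaces A's seven sequential endswith tests per filename by one rpartition('.')
-- extension extraction followed by a single set-membership test (correct because no
-- tag contains a dot and the seven suffixes are mutually exclusive); objective: simpler.

-- ===== PORT A =====
-- the elif chain of A's loop body: some tag, or none where A raises ValueError
def tagA (i : String) : Option String :=
  if PySem.Str.endswith i ".cs_H" then some "cs_H"
  else if PySem.Str.endswith i ".cs_Ha" then some "cs_Ha"
  else if PySem.Str.endswith i ".cs_N" then some "cs_N"
  else if PySem.Str.endswith i ".cs_Ca" then some "cs_Ca"
  else if PySem.Str.endswith i ".J" then some "J"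
  else if PySem.Str.endswith i ".pf" then some "pf"
  else if PySem.Str.endswith i ".noe" then some "noe"
  else none

-- A's for-loop appending to scheme; none where the Python raises
def listResLoopA (scheme : List String) : List String → Option (List String)
  | [] => some scheme
  | i :: rest =>
    match tagA i with
    | some t => listResLoopA (scheme ++ [t]) rest
    | none => none

def list_res (input_data : List (List String)) : List String :=
  ((PySem.List.pyGet? input_data 0).bind (listResLoopA [])).getD []

-- ===== PORT B =====
-- the set _TAGS (distinct elements, per the set convention)
def pvTags : List String := ["cs_H", "cs_Ha", "cs_N", "cs_Ca", "J", "pf", "noe"]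

-- Source B's _tag: filename.rpartition('.') ported by hand (exact: the extension is the
-- reversed chars before the first '.' of the reversed string; dot truthy iff '.' occurs),
-- then one membership test in _TAGS; none where _tag raises ValueError
def tagB (filename : String) : Option String :=
  let r := filename.toList.reverse
  let ext := String.ofList (r.takeWhile (· ≠ '.')).reverse
  if r.contains '.' && pvTags.contains ext then some ext else none

def list_res_alt (input_data : List (List String)) : List String :=
  ((PySem.List.pyGet? input_data 0).getD []).map (fun i => (tagB i).getD "")

-- ===== PRECONDITION & SPEC =====
-- Pre_ excludes exactly the inputs on which A raises: the empty outer list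
-- (IndexError on input_data[0]) and first rows containing a filename with none
-- of the seven recognised suffixes (ValueError).
def matchesScheme (s : String) : Bool :=
  PySem.Str.endswith s ".cs_H" || PySem.Str.endswith s ".cs_Ha" ||
  PySem.Str.endswith s ".cs_N" || PySem.Str.endswith s ".cs_Ca" ||
  PySem.Str.endswith s ".J" || PySem.Str.endswith s ".pf" ||
  PySem.Str.endswith s ".noe"

def Pre_list_res (input_data : List (List String)) : Prop :=
  input_data ≠ [] ∧ ∀ s ∈ input_data.headD [], matchesScheme s = true

instance (input_data : List (List String)) : Decidable (Pre_list_res input_data) := by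
  unfold Pre_list_res; infer_instance

def pvWitness_list_res : List (List String) := [["top.noe", "data.cs_H"], ["x.J"]]

def Spec_list_res (input_data : List (List String)) (out : List String) : Prop := out = list_res_alt input_data
instance (input_data : List (List String)) (out : List String) : Decidable (Spec_list_res input_data out) := by unfold Spec_list_res; infer_instance

-- ===== CLAIM (what is proved, stated in full; the proofs are below) =====
def Claim_equal_list_res : Prop := ∀ (input_data : List (List String)), Dom_list_res input_data → Pre_list_res input_data → Spec_list_res input_data (list_res input_data)

-- ===== LEMMAS AND PROOFS =====
-- a pattern ending in '.' is a prefix of l iff '.' occurs in l and the chars of l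
-- before its first '.' are exactly the pattern (the pattern itself dot-free)
theorem prefix_dot_iff (q l : List Char) (hq : '.' ∉ q) :
    (q ++ ['.']) <+: l ↔ (l.takeWhile (· ≠ '.') = q ∧ '.' ∈ l) := by
  induction q generalizing l with
  | nil =>
    cases l with
    | nil => simp
    | cons c l' =>
      by_cases hc : c = '.'
      · subst hc; simp
      · simp [hc, List.cons_prefix_cons, Ne.symm hc]
  | cons a q ih =>
    have ha : a ≠ '.' := fun h => hq (h ▸ List.mem_cons_self ..)
    have hq' : '.' ∉ q := fun h => hq (List.mem_cons_of_mem _ h)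
    cases l with
    | nil => simp
    | cons c l' =>
      by_cases hc : c = a
      · subst hc
        simp [List.cons_prefix_cons, ha, ih l' hq', Ne.symm ha]
      · constructor
        · intro h; rw [List.cons_append, List.cons_prefix_cons] at h
          exact absurd h.1.symm hc
        · rintro ⟨ht, -⟩
          exfalso
          by_cases hcd : c = '.'
          · simp [hcd] at ht
          · simp [hcd] at ht
            first
              | exact hc ht.1
              | exact hc ht.1.symm

-- endswith through reversal, specialised to a pattern '.'+t with t dot-free
theorem endswith_iff_ext (s p t : String) (hp : p.toList = '.' :: t.toList)
    (ht : '.' ∉ t.toList) :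
    PySem.Str.endswith s p = true ↔
      (s.toList.reverse.takeWhile (· ≠ '.') = t.toList.reverse ∧
        '.' ∈ s.toList.reverse) := by
  rw [PySem.Str.endswith_eq, PySem.Chars.endswith_iff, hp, ← List.reverse_prefix]
  simp only [List.reverse_cons]
  rw [prefix_dot_iff _ _ (by simpa using ht)]

-- turning ofList back into a list equation
theorem ofList_rev_eq (e : List Char) (t : String)
    (h : String.ofList e.reverse = t) : e = t.toList.reverse := by
  have h2 := congrArg String.toList h
  simp only [String.toList_ofList] at h2
  rw [← h2, List.reverse_reverse]

-- the elif chain and the extension lookup pick the same tag (both none when nothing matches)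
theorem tagA_eq_tagB (s : String) : tagA s = tagB s := by
  have e1 := endswith_iff_ext s ".cs_H" "cs_H" (by decide) (by decide)
  have e2 := endswith_iff_ext s ".cs_Ha" "cs_Ha" (by decide) (by decide)
  have e3 := endswith_iff_ext s ".cs_N" "cs_N" (by decide) (by decide)
  have e4 := endswith_iff_ext s ".cs_Ca" "cs_Ca" (by decide) (by decide)
  have e5 := endswith_iff_ext s ".J" "J" (by decide) (by decide)
  have e6 := endswith_iff_ext s ".pf" "pf" (by decide) (by decide)
  have e7 := endswith_iff_ext s ".noe" "noe" (by decide) (by decide)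
  have hBdef : tagB s = if s.toList.reverse.contains '.' && pvTags.contains
      (String.ofList ((s.toList.reverse.takeWhile (· ≠ '.')).reverse)) then
      some (String.ofList ((s.toList.reverse.takeWhile (· ≠ '.')).reverse)) else none := rfl
  by_cases hd : '.' ∈ s.toList.reverse
  · have hc : s.toList.reverse.contains '.' = true := by simpa using hd
    have p1 : PySem.Str.endswith s ".cs_H" = decide
        (s.toList.reverse.takeWhile (· ≠ '.') = "cs_H".toList.reverse) := by
      by_cases h : s.toList.reverse.takeWhile (· ≠ '.') = "cs_H".toList.reverse
      · rw [e1.mpr ⟨h, hd⟩, h]; decide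
      · have hf : PySem.Str.endswith s ".cs_H" = false := by
          rw [Bool.eq_false_iff]; intro hh; exact h (e1.mp hh).1
        rw [hf]; exact (decide_eq_false h).symm
    have p2 : PySem.Str.endswith s ".cs_Ha" = decide
        (s.toList.reverse.takeWhile (· ≠ '.') = "cs_Ha".toList.reverse) := by
      by_cases h : s.toList.reverse.takeWhile (· ≠ '.') = "cs_Ha".toList.reverse
      · rw [e2.mpr ⟨h, hd⟩, h]; decide
      · have hf : PySem.Str.endswith s ".cs_Ha" = false := by
          rw [Bool.eq_false_iff]; intro hh; exact h (e2.mp hh).1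
        rw [hf]; exact (decide_eq_false h).symm
    have p3 : PySem.Str.endswith s ".cs_N" = decide
        (s.toList.reverse.takeWhile (· ≠ '.') = "cs_N".toList.reverse) := by
      by_cases h : s.toList.reverse.takeWhile (· ≠ '.') = "cs_N".toList.reverse
      · rw [e3.mpr ⟨h, hd⟩, h]; decide
      · have hf : PySem.Str.endswith s ".cs_N" = false := by
          rw [Bool.eq_false_iff]; intro hh; exact h (e3.mp hh).1
        rw [hf]; exact (decide_eq_false h).symm
    have p4 : PySem.Str.endswith s ".cs_Ca" = decide
        (s.toList.reverse.takeWhile (· ≠ '.') = "cs_Ca".toList.reverse) := by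
      by_cases h : s.toList.reverse.takeWhile (· ≠ '.') = "cs_Ca".toList.reverse
      · rw [e4.mpr ⟨h, hd⟩, h]; decide
      · have hf : PySem.Str.endswith s ".cs_Ca" = false := by
          rw [Bool.eq_false_iff]; intro hh; exact h (e4.mp hh).1
        rw [hf]; exact (decide_eq_false h).symm
    have p5 : PySem.Str.endswith s ".J" = decide
        (s.toList.reverse.takeWhile (· ≠ '.') = "J".toList.reverse) := by
      by_cases h : s.toList.reverse.takeWhile (· ≠ '.') = "J".toList.reverse
      · rw [e5.mpr ⟨h, hd⟩, h]; decide
      · have hf : PySem.Str.endswith s ".J" = false := by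
          rw [Bool.eq_false_iff]; intro hh; exact h (e5.mp hh).1
        rw [hf]; exact (decide_eq_false h).symm
    have p6 : PySem.Str.endswith s ".pf" = decide
        (s.toList.reverse.takeWhile (· ≠ '.') = "pf".toList.reverse) := by
      by_cases h : s.toList.reverse.takeWhile (· ≠ '.') = "pf".toList.reverse
      · rw [e6.mpr ⟨h, hd⟩, h]; decide
      · have hf : PySem.Str.endswith s ".pf" = false := by
          rw [Bool.eq_false_iff]; intro hh; exact h (e6.mp hh).1
        rw [hf]; exact (decide_eq_false h).symm
    have p7 : PySem.Str.endswith s ".noe" = decide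
        (s.toList.reverse.takeWhile (· ≠ '.') = "noe".toList.reverse) := by
      by_cases h : s.toList.reverse.takeWhile (· ≠ '.') = "noe".toList.reverse
      · rw [e7.mpr ⟨h, hd⟩, h]; decide
      · have hf : PySem.Str.endswith s ".noe" = false := by
          rw [Bool.eq_false_iff]; intro hh; exact h (e7.mp hh).1
        rw [hf]; exact (decide_eq_false h).symm
    rw [hBdef, hc]
    simp only [tagA, p1, p2, p3, p4, p5, p6, p7]
    by_cases h1 : s.toList.reverse.takeWhile (· ≠ '.') = "cs_H".toList.reverse
    · simp only [h1]; decide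
    by_cases h2 : s.toList.reverse.takeWhile (· ≠ '.') = "cs_Ha".toList.reverse
    · simp only [h2]; decide
    by_cases h3 : s.toList.reverse.takeWhile (· ≠ '.') = "cs_N".toList.reverse
    · simp only [h3]; decide
    by_cases h4 : s.toList.reverse.takeWhile (· ≠ '.') = "cs_Ca".toList.reverse
    · simp only [h4]; decide
    by_cases h5 : s.toList.reverse.takeWhile (· ≠ '.') = "J".toList.reverse
    · simp only [h5]; decide
    by_cases h6 : s.toList.reverse.takeWhile (· ≠ '.') = "pf".toList.reverse
    · simp only [h6]; decide
    by_cases h7 : s.toList.reverse.takeWhile (· ≠ '.') = "noe".toList.reverse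
    · simp only [h7]; decide
    have hno : pvTags.contains
        (String.ofList ((s.toList.reverse.takeWhile (· ≠ '.')).reverse)) = false := by
      rw [Bool.eq_false_iff]
      intro hcon
      have hm := by simpa [pvTags] using hcon
      rcases hm with h|h|h|h|h|h|h
      · exact h1 (ofList_rev_eq _ _ (by simpa using h))
      · exact h2 (ofList_rev_eq _ _ (by simpa using h))
      · exact h3 (ofList_rev_eq _ _ (by simpa using h))
      · exact h4 (ofList_rev_eq _ _ (by simpa using h))
      · exact h5 (ofList_rev_eq _ _ (by simpa using h))
      · exact h6 (ofList_rev_eq _ _ (by simpa using h))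
      · exact h7 (ofList_rev_eq _ _ (by simpa using h))
    rw [if_neg (by rw [decide_eq_true_eq]; exact h1),
      if_neg (by rw [decide_eq_true_eq]; exact h2),
      if_neg (by rw [decide_eq_true_eq]; exact h3),
      if_neg (by rw [decide_eq_true_eq]; exact h4),
      if_neg (by rw [decide_eq_true_eq]; exact h5),
      if_neg (by rw [decide_eq_true_eq]; exact h6),
      if_neg (by rw [decide_eq_true_eq]; exact h7)]
    rw [hno, Bool.and_false]
    simp
  · have hc : s.toList.reverse.contains '.' = false := by simpa using hd
    have n1 : PySem.Str.endswith s ".cs_H" = false := by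
      rw [Bool.eq_false_iff]; intro h; exact hd (e1.mp h).2
    have n2 : PySem.Str.endswith s ".cs_Ha" = false := by
      rw [Bool.eq_false_iff]; intro h; exact hd (e2.mp h).2
    have n3 : PySem.Str.endswith s ".cs_N" = false := by
      rw [Bool.eq_false_iff]; intro h; exact hd (e3.mp h).2
    have n4 : PySem.Str.endswith s ".cs_Ca" = false := by
      rw [Bool.eq_false_iff]; intro h; exact hd (e4.mp h).2
    have n5 : PySem.Str.endswith s ".J" = false := by
      rw [Bool.eq_false_iff]; intro h; exact hd (e5.mp h).2
    have n6 : PySem.Str.endswith s ".pf" = false := by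
      rw [Bool.eq_false_iff]; intro h; exact hd (e6.mp h).2
    have n7 : PySem.Str.endswith s ".noe" = false := by
      rw [Bool.eq_false_iff]; intro h; exact hd (e7.mp h).2
    rw [hBdef, hc]
    unfold tagA
    rw [n1, n2, n3, n4, n5, n6, n7]
    simp

theorem tagA_isSome_of_matches (s : String) (h : matchesScheme s = true) :
    (tagA s).isSome := by
  unfold matchesScheme at h
  unfold tagA
  split_ifs <;> simp_all

theorem loopA_eq_map (row : List String) (acc : List String)
    (h : ∀ s ∈ row, matchesScheme s = true) :
    listResLoopA acc row = some (acc ++ row.map (fun s => (tagB s).getD "")) := by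
  induction row generalizing acc with
  | nil => simp [listResLoopA]
  | cons i rest ih =>
    have hm := h i (List.mem_cons_self ..)
    have hs := tagA_isSome_of_matches i hm
    unfold listResLoopA
    cases ht : tagA i with
    | none => simp [ht] at hs
    | some t =>
      show listResLoopA (acc ++ [t]) rest = _
      rw [ih _ (fun s hsm => h s (List.mem_cons_of_mem _ hsm))]
      have : (tagB i).getD "" = t := by rw [← tagA_eq_tagB, ht]; rfl
      simp [this]

-- ===== VERDICT (by name: the statement is the Claim_ definition above) =====
theorem list_res_spec : Claim_equal_list_res := by
  intro input_data _ hpre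
  obtain ⟨hne, hall⟩ := hpre
  cases input_data with
  | nil => exact absurd rfl hne
  | cons row rest =>
    unfold Spec_list_res list_res list_res_alt
    have hget : PySem.List.pyGet? (row :: rest) (0 : Int) = some row := by
      simp [PySem.List.pyGet?, PySem.List.pyIdx?]
    rw [hget, Option.bind_some, loopA_eq_map row [] (by simpa using hall)]
    simp
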